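-- pv_equiv track=rewrite | github.com/fpl-xylotron/frontiers-in-plant-science-2020a | xylotron/xylo/apps/ref/xylo_ref_ui.py | _sanitize_genus
-- ===== SOURCE A (Python) =====
-- def _sanitize_genus(genus: str) -> str:
--     sgenus = ""
--     for c in genus.strip():
--         if c.isalnum() and c != "_":
--             sgenus += c
--         else:
--             sgenus += "-"
--     tkns = [t.lower() for t in sgenus.split("-") if t.strip()]
--     tkns[0] = tkns[0].title()
--     sgenus = "-".join(tkns)
--     return sgenus
-- ===== SOURCE B (Python) =====
-- def _sanitize_genus(genus: str) -> str:
--     # Single pass: collect maximal alnum runs (lowered) directly, no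
--     # replacement string and no split.
--     tkns = []
--     cur = None
--     for c in genus.strip():
--         if c.isalnum():
--             cur = c.lower() if cur is None else cur + c.lower()
--         else:
--             if cur is not None:
--                 tkns.append(cur)
--                 cur = None
--     if cur is not None:
--         tkns.append(cur)
--     return "-".join([tkns[0].title()] + tkns[1:])
-- ===== Notes on version B (the rewrite author's own statement) =====
-- stated objective: alternative
-- what changed: B collects the maximal alphanumeric runs (lowercased) in a single pass with a current-run accumulator, instead of A's three-stage pipeline that first rewrites every non-alphanumeric character to '-', then splits on '-', then filters and lowercases the pieces.
import Mathlib
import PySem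

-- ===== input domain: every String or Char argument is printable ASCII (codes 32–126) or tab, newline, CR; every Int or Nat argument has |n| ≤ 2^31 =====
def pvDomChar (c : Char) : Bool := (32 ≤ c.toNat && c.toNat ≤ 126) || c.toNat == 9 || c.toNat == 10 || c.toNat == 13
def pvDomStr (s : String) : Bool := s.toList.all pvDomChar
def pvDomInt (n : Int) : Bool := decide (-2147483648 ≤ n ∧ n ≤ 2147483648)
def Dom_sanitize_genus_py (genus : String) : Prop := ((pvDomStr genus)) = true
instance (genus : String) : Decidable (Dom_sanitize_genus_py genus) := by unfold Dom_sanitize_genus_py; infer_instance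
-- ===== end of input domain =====

-- B replaces A's replace-then-split-then-filter pipeline by a single pass that
-- collects the lowercased alphanumeric runs directly (alternative decomposition, same cost).

-- shared primitive port: Python str.title(); exact on the ASCII domain (there 'cased' = isalpha,
-- titlecase = uppercase); both Source A and Source B call .title() on the first token.
def pyTitleGo : List Char → Bool → List Char
  | [], _ => []
  | c :: rest, prevCased =>
    (if PySem.Chars.isalpha c then
        (if prevCased then PySem.Chars.lowerChar c else PySem.Chars.upperChar c)
      else c) :: pyTitleGo rest (PySem.Chars.isalpha c)

def pyTitle (cs : List Char) : List Char := pyTitleGo cs false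

-- ===== PORT A =====
def sanitize_genus_py (genus : String) : String :=
  let sgenus : List Char :=
    (PySem.Chars.strip genus.toList).foldl
      (fun acc c => acc ++ [if (PySem.Chars.isalnum c && c != '_') = true then c else '-']) []
  let tkns : List (List Char) :=
    ((PySem.Chars.splitOn sgenus ['-']).filter
      (fun t => !(PySem.Chars.strip t).isEmpty)).map PySem.Chars.lower
  match tkns with
  | [] => ""   -- Python raises IndexError at tkns[0] here; excluded by Pre_
  | t0 :: rest => String.ofList (PySem.Chars.join ['-'] (pyTitle t0 :: rest))

-- ===== PORT B =====
-- the loop of Source B: state = (current run or None, finished tokens)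
def altCollect : List Char → Option (List Char) → List (List Char) → List (List Char)
  | [], none, tkns => tkns
  | [], some cur, tkns => tkns ++ [cur]
  | c :: rest, cur?, tkns =>
    if PySem.Chars.isalnum c then
      altCollect rest
        (some (match cur? with
               | none => [PySem.Chars.lowerChar c]
               | some cur => cur ++ [PySem.Chars.lowerChar c])) tkns
    else
      match cur? with
      | none => altCollect rest none tkns
      | some cur => altCollect rest none (tkns ++ [cur])

def sanitize_genus_py_alt (genus : String) : String :=
  match altCollect (PySem.Chars.strip genus.toList) none [] with
  | [] => ""   -- Python raises IndexError at tkns[0] here; excluded by Pre_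
  | t0 :: rest => String.ofList (PySem.Chars.join ['-'] (pyTitle t0 :: rest))

-- ===== PRECONDITION & SPEC =====
-- Pre_ excludes exactly the inputs without any alphanumeric character, on which
-- the Python A (and B) raises IndexError at tkns[0].
def Pre_sanitize_genus_py (genus : String) : Prop :=
  genus.toList.any PySem.Chars.isalnum = true
instance (genus : String) : Decidable (Pre_sanitize_genus_py genus) := by
  unfold Pre_sanitize_genus_py; infer_instance

def pvWitness_sanitize_genus_py : String := "acer RUBRUM"

def Spec_sanitize_genus_py (genus : String) (out : String) : Prop := out = sanitize_genus_py_alt genus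
instance (genus : String) (out : String) : Decidable (Spec_sanitize_genus_py genus out) := by unfold Spec_sanitize_genus_py; infer_instance

-- ===== CLAIM (what is proved, stated in full; the proofs are below) =====
def Claim_equal_sanitize_genus_py : Prop := ∀ (genus : String), Dom_sanitize_genus_py genus → Pre_sanitize_genus_py genus → Spec_sanitize_genus_py genus (sanitize_genus_py genus)

-- ===== LEMMAS AND PROOFS =====

-- A's character replacement, with the dead 'c != "_"' test removed ('_' is not alnum)
def pvRepl (c : Char) : Char := if PySem.Chars.isalnum c then c else '-'

-- reference form of split on the single character '-'
def pvSplitDash : List Char → List (List Char)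
  | [] => [[]]
  | c :: rest => if c = '-' then [] :: pvSplitDash rest else (pvSplitDash rest).modifyHead (c :: ·)

lemma pv_cond_eq (c : Char) :
    (if (PySem.Chars.isalnum c && c != '_') = true then c else '-') = pvRepl c := by
  by_cases h : c = '_'
  · subst h; decide
  · have hb : (c != '_') = true := by simp [bne_iff_ne, h]
    simp [pvRepl, hb]

lemma pv_modifyHead_comp {α : Type} (f g : List α → List α) (S : List (List α)) :
    (S.modifyHead g).modifyHead f = S.modifyHead (fun x => f (g x)) := by
  cases S <;> simp

lemma pv_splitDash_ne_nil (l : List Char) : pvSplitDash l ≠ [] := by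
  induction l with
  | nil => simp [pvSplitDash]
  | cons c rest ih =>
    by_cases h : c = '-'
    · simp [pvSplitDash, h]
    · obtain ⟨a, t, he⟩ := List.exists_cons_of_ne_nil ih
      simp [pvSplitDash, h, he]

lemma pv_go_dash (fuel : Nat) (rest cur : List Char) (acc : List (List Char)) :
    PySem.Chars.splitOn.go ['-'] (fuel+1) ('-' :: rest) cur acc
      = PySem.Chars.splitOn.go ['-'] fuel rest [] (cur.reverse :: acc) := by
  rw [PySem.Chars.splitOn.go]
  simp [List.isPrefixOf]

lemma pv_go_other (fuel : Nat) (c : Char) (rest cur : List Char) (acc : List (List Char))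
    (h : c ≠ '-') :
    PySem.Chars.splitOn.go ['-'] (fuel+1) (c :: rest) cur acc
      = PySem.Chars.splitOn.go ['-'] fuel rest (c :: cur) acc := by
  rw [PySem.Chars.splitOn.go]
  simp [List.isPrefixOf, Ne.symm h]

lemma pv_go_eq : ∀ (fuel : Nat) (l cur : List Char) (acc : List (List Char)), l.length ≤ fuel →
    PySem.Chars.splitOn.go ['-'] fuel l cur acc
      = acc.reverse ++ (pvSplitDash l).modifyHead (cur.reverse ++ ·) := by
  intro fuel
  induction fuel with
  | zero =>
    intro l cur acc h
    have hl : l = [] := by cases l <;> simp_all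
    subst hl
    simp [PySem.Chars.splitOn.go, pvSplitDash]
  | succ fuel ih =>
    intro l cur acc h
    cases l with
    | nil => simp [PySem.Chars.splitOn.go, pvSplitDash]
    | cons c rest =>
      have hr : rest.length ≤ fuel := by simp at h; omega
      by_cases hc : c = '-'
      · subst hc
        rw [pv_go_dash, ih rest [] (cur.reverse :: acc) hr]
        rw [pvSplitDash, if_pos rfl]
        cases pvSplitDash rest <;> simp
      · rw [pv_go_other fuel c rest cur acc hc, ih rest (c :: cur) acc hr]
        rw [pvSplitDash, if_neg hc, pv_modifyHead_comp]
        cases pvSplitDash rest <;> simp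

lemma pv_splitOn_eq (l : List Char) : PySem.Chars.splitOn l ['-'] = pvSplitDash l := by
  unfold PySem.Chars.splitOn
  rw [pv_go_eq (l.length + 1) l [] [] (Nat.le_succ _)]
  cases h : pvSplitDash l with
  | nil => simp
  | cons a t => simp

lemma pv_alnum_not_space (c : Char) (h : PySem.Chars.isalnum c = true) :
    PySem.Chars.isspace c = false := by
  have e1 : ('A' : Char).val.toNat = 65 := rfl
  have e2 : ('Z' : Char).val.toNat = 90 := rfl
  have e3 : ('a' : Char).val.toNat = 97 := rfl
  have e4 : ('z' : Char).val.toNat = 122 := rfl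
  have e5 : ('0' : Char).val.toNat = 48 := rfl
  have e6 : ('9' : Char).val.toNat = 57 := rfl
  simp only [PySem.Chars.isalnum, PySem.Chars.isalpha, PySem.Chars.isdigit, PySem.Chars.isupper,
    PySem.Chars.islower, PySem.Chars.isspace, Char.le_def, UInt32.le_iff_toNat_le, Char.toNat,
    Bool.or_eq_true, Bool.and_eq_true, decide_eq_true_eq, Bool.or_eq_false_iff,
    Bool.and_eq_false_iff, decide_eq_false_iff_not, e1, e2, e3, e4, e5, e6] at *
  omega

lemma pv_strip_eq_self (t : List Char) (h : ∀ c ∈ t, PySem.Chars.isspace c = false) :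
    PySem.Chars.strip t = t := by
  have h1 : List.dropWhile PySem.Chars.isspace t = t := by
    rw [List.dropWhile_eq_self_iff]
    intro hl hsp
    rw [h _ (List.getElem_mem hl)] at hsp
    exact absurd hsp (by simp)
  have h2 : List.dropWhile PySem.Chars.isspace t.reverse = t.reverse := by
    rw [List.dropWhile_eq_self_iff]
    intro hl hsp
    rw [h _ (List.mem_reverse.mp (List.getElem_mem hl))] at hsp
    exact absurd hsp (by simp)
  simp [PySem.Chars.strip, PySem.Chars.lstrip, PySem.Chars.rstrip, h1, h2]

lemma pv_tokens_alnum : ∀ (ds : List Char), ∀ t ∈ pvSplitDash (ds.map pvRepl),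
    ∀ c ∈ t, PySem.Chars.isalnum c = true := by
  intro ds
  induction ds with
  | nil => simp [pvSplitDash]
  | cons d rest ih =>
    intro t ht c hc
    by_cases hd : PySem.Chars.isalnum d = true
    · have hr : pvRepl d = d := by simp [pvRepl, hd]
      have hdd : d ≠ '-' := by
        intro he; rw [he] at hd; exact absurd hd (by decide)
      obtain ⟨h0, ts, hS⟩ := List.exists_cons_of_ne_nil (pv_splitDash_ne_nil (rest.map pvRepl))
      simp only [List.map_cons, hr] at ht
      rw [pvSplitDash, if_neg hdd, hS] at ht
      simp only [List.modifyHead] at ht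
      rcases List.mem_cons.mp ht with rfl | h2
      · rcases List.mem_cons.mp hc with rfl | hc0
        · exact hd
        · exact ih h0 (by rw [hS]; exact List.mem_cons_self) c hc0
      · exact ih t (by rw [hS]; exact List.mem_cons_of_mem _ h2) c hc
    · have hr : pvRepl d = '-' := by simp [pvRepl, hd]
      simp only [List.map_cons, hr] at ht
      rw [pvSplitDash, if_pos rfl] at ht
      rcases List.mem_cons.mp ht with rfl | h2
      · simp at hc
      · exact ih t h2 c hc

lemma pv_map_lower_modifyHead (c : Char) (S : List (List Char)) :
    (S.modifyHead (c :: ·)).map PySem.Chars.lower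
      = (S.map PySem.Chars.lower).modifyHead (PySem.Chars.lowerChar c :: ·) := by
  cases S <;> simp [PySem.Chars.lower]

lemma pv_altCollect_spec : ∀ (ds : List Char),
    (∀ tkns, altCollect ds none tkns
        = tkns ++ ((pvSplitDash (ds.map pvRepl)).map PySem.Chars.lower).filter (fun t => !t.isEmpty))
    ∧ (∀ cur tkns, cur ≠ [] → altCollect ds (some cur) tkns
        = tkns ++ (((pvSplitDash (ds.map pvRepl)).map PySem.Chars.lower).modifyHead
            (cur ++ ·)).filter (fun t => !t.isEmpty)) := by
  intro ds
  induction ds with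
  | nil =>
    constructor
    · intro tkns; simp [altCollect, pvSplitDash, PySem.Chars.lower]
    · intro cur tkns hcur
      simp [altCollect, pvSplitDash, PySem.Chars.lower, hcur]
  | cons d rest ih =>
    obtain ⟨ih1, ih2⟩ := ih
    by_cases hd : PySem.Chars.isalnum d = true
    · have hr : pvRepl d = d := by simp [pvRepl, hd]
      have hdd : d ≠ '-' := by
        intro he; rw [he] at hd; exact absurd hd (by decide)
      constructor
      · intro tkns
        rw [altCollect, if_pos hd]
        rw [ih2 [PySem.Chars.lowerChar d] tkns (by simp)]
        simp only [List.map_cons, hr]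
        rw [pvSplitDash, if_neg hdd, pv_map_lower_modifyHead]
        simp
      · intro cur tkns hcur
        rw [altCollect, if_pos hd]
        rw [ih2 (cur ++ [PySem.Chars.lowerChar d]) tkns (by simp)]
        simp only [List.map_cons, hr]
        rw [pvSplitDash, if_neg hdd, pv_map_lower_modifyHead, pv_modifyHead_comp]
        simp
    · have hr : pvRepl d = '-' := by simp [pvRepl, hd]
      constructor
      · intro tkns
        rw [altCollect, if_neg hd]
        rw [ih1 tkns]
        simp only [List.map_cons, hr]
        rw [pvSplitDash, if_pos rfl]
        simp [PySem.Chars.lower]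
      · intro cur tkns hcur
        rw [altCollect, if_neg hd]
        rw [ih1 (tkns ++ [cur])]
        simp only [List.map_cons, hr]
        rw [pvSplitDash, if_pos rfl]
        simp [PySem.Chars.lower, List.modifyHead, hcur]

lemma pv_main (ds : List Char) :
    ((PySem.Chars.splitOn
        (ds.foldl (fun acc c =>
          acc ++ [if (PySem.Chars.isalnum c && c != '_') = true then c else '-']) []) ['-']).filter
      (fun t => !(PySem.Chars.strip t).isEmpty)).map PySem.Chars.lower
      = altCollect ds none [] := by
  have hfold : ds.foldl (fun acc c =>
      acc ++ [if (PySem.Chars.isalnum c && c != '_') = true then c else '-']) [] = ds.map pvRepl := by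
    rw [PySem.List.foldl_append_singleton_eq_map]
    simp only [List.nil_append]
    exact List.map_congr_left (fun c _ => pv_cond_eq c)
  rw [hfold, pv_splitOn_eq]
  have hfilter : (pvSplitDash (ds.map pvRepl)).filter (fun t => !(PySem.Chars.strip t).isEmpty)
      = (pvSplitDash (ds.map pvRepl)).filter (fun t => !t.isEmpty) := by
    apply List.filter_congr
    intro t ht
    rw [pv_strip_eq_self t (fun c hc => pv_alnum_not_space c (pv_tokens_alnum ds t ht c hc))]
  rw [hfilter]
  rw [(pv_altCollect_spec ds).1 []]
  rw [List.filter_map]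
  simp only [List.nil_append]
  congr 1
  apply List.filter_congr
  intro t ht
  simp [PySem.Chars.lower]

-- ===== VERDICT (by name: the statement is the Claim_ definition above) =====
theorem sanitize_genus_py_spec : Claim_equal_sanitize_genus_py := by
  intro genus _ _
  unfold Spec_sanitize_genus_py sanitize_genus_py sanitize_genus_py_alt
  simp only [pv_main]
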